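-- pv_equiv track=rewrite | github.com/soham7kulkarni/Leetcodes | 649-dota2-senate/dota2-senate.py | predictPartyVictory
-- ===== SOURCE A (Python) =====
-- from collections import deque
--
-- def predictPartyVictory(senate: str) -> str:
--     # Create queues for both factions
--     radiant = deque()
--     dire = deque()
--
--     # Fill the queues with the indices of the senators
--     for i, s in enumerate(senate):
--         if s == 'R':
--             radiant.append(i)  # Add index to radiant queue
--         else:
--             dire.append(i)  # Add index to dire queue
--
--     # While both queues have senators
--     while radiant and dire:
--         # Get the indices of the next senators
--         r_index = radiant.popleft()  # Radiant's senator index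
--         d_index = dire.popleft()      # Dire's senator index
--
--         # Compare the indices to determine who votes first
--         if r_index < d_index:
--             # Radiant votes first and eliminates a Dire senator
--             radiant.append(r_index + len(senate))  # Push back radiant's index to last for new round
--         else:
--             # Dire votes first and eliminates a Radiant senator
--             dire.append(d_index + len(senate))  # Push back dire's index to last for new round
--
--     # Determine the winner based on which queue is non-empty
--     return "Radiant" if radiant else "Dire"
-- ===== SOURCE B (Python) =====
-- def _ban_first(q, is_target):
--     # remove the first element of q satisfying is_target (in place)
--     for i, x in enumerate(q):
--         if is_target(x):
--             del q[i]
--             return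
--
--
-- def predictPartyVictory(senate: str) -> str:
--     # Direct simulation on one list of characters: the senator at the front
--     # bans the earliest opposing senator, then moves to the back of the line.
--     q = list(senate)
--     while True:
--         r = q.count('R')
--         if r == 0:
--             return "Dire"
--         if r == len(q):
--             return "Radiant"
--         c = q.pop(0)
--         if c == 'R':
--             _ban_first(q, lambda x: x != 'R')
--         else:
--             _ban_first(q, lambda x: x == 'R')
--         q.append(c)
-- ===== Notes on version B (the rewrite author's own statement) =====
-- stated objective: simpler
-- what changed: B simulates the game directly on a single list of characters (the front senator removes the earliest opposing senator and moves to the back) instead of A's two index queues with the index+len re-insertion trick.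
import Mathlib
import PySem

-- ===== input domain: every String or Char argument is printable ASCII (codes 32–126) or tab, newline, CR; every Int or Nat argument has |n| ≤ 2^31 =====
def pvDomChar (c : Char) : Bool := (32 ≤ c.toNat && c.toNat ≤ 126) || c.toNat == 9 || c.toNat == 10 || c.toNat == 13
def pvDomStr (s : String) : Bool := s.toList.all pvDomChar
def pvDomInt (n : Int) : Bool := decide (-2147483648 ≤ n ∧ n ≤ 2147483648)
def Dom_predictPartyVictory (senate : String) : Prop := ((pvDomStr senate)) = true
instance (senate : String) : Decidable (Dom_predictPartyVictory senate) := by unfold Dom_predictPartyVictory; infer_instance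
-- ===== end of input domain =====

-- B replaces A's two index queues (with the index+len re-insertion trick) by a direct
-- simulation on one list of characters: the front senator bans the earliest opposing
-- senator and moves to the back.  Simpler bookkeeping, not faster.

-- ===== PORT A =====
-- the while loop of A: two queues of senator indices, n = len(senate)
def loopA : List Int → List Int → Int → String
  | r0 :: r, d0 :: d, n =>
    if r0 < d0 then loopA (r ++ [r0 + n]) d n
    else loopA r (d ++ [d0 + n]) n
  | [], _, _ => "Dire"
  | _, _, _ => "Radiant"
termination_by r d _ => r.length + d.length
decreasing_by
  all_goals simp

def predictPartyVictory (senate : String) : String :=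
  -- for i, s in enumerate(senate): append i to radiant / dire
  let rd := (PySem.List.enumerate senate.toList 0).foldl
    (fun rd p => if p.2 == 'R' then (rd.1 ++ [p.1], rd.2) else (rd.1, rd.2 ++ [p.1]))
    (([] : List Int), ([] : List Int))
  loopA rd.1 rd.2 (senate.toList.length : Int)

-- ===== PORT B =====
-- _ban_first(q, is_target): remove the first element satisfying the predicate
def removeFirst (p : Char → Bool) : List Char → List Char
  | [] => []
  | x :: xs => if p x then xs else x :: removeFirst p xs

-- length fact cited by loopB's termination proof
theorem removeFirst_length_lt (p : Char → Bool) :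
    ∀ xs : List Char, (∃ x ∈ xs, p x = true) → (removeFirst p xs).length < xs.length := by
  intro xs h
  induction xs with
  | nil => simp at h
  | cons x xs ih =>
    by_cases hx : p x = true
    · simp [removeFirst, hx]
    · obtain ⟨y, hy, hpy⟩ := h
      rcases List.mem_cons.mp hy with hy | hy
      · exact absurd (hy ▸ hpy) hx
      · have := ih ⟨y, hy, hpy⟩
        simp [removeFirst, hx]
        omega

-- the while-True loop of B on the character list
def loopB (q : List Char) : String :=
  if h0 : q.count 'R' = 0 then "Dire"
  else if h1 : q.count 'R' = q.length then "Radiant"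
  else
    match q with
    | [] => "Dire"   -- unreachable (count 'R' q = 0 would hold); totality guard only
    | c :: t =>
      if hc : c = 'R' then loopB (removeFirst (fun x => !(x == 'R')) t ++ [c])
      else loopB (removeFirst (fun x => x == 'R') t ++ [c])
termination_by q.length
decreasing_by
  · have hex : ∃ x ∈ t, (fun x => !(x == 'R')) x = true := by
      by_contra hall
      push_neg at hall
      have hall' : ∀ b ∈ t, 'R' = b := by
        intro b hb
        have hb' := hall b hb
        have : (b == 'R') = true := by
          cases hbe : (b == 'R') with
          | true => rfl
          | false => exact absurd (by simp [hbe]) hb'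
        have hb2 : b = 'R' := by simpa using this
        exact hb2.symm
      have : (c :: t).count 'R' = (c :: t).length := by
        rw [List.count_eq_length]
        intro b hb
        rcases List.mem_cons.mp hb with hb | hb
        · simp [hb, hc]
        · exact hall' b hb
      exact h1 this
    have hlt := removeFirst_length_lt _ t hex
    have : (removeFirst (fun x => !(x == 'R')) t ++ [c]).length = (removeFirst (fun x => !(x == 'R')) t).length + 1 := by simp
    simp only [this, List.length_cons]
    omega
  · have hmem : 'R' ∈ t := by
      have hcnt : (c :: t).count 'R' = t.count 'R' := by
        rw [List.count_cons]
        simp [hc]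
      have : t.count 'R' ≠ 0 := by rw [← hcnt]; exact h0
      exact List.count_pos_iff.mp (Nat.pos_of_ne_zero this)
    have hex : ∃ x ∈ t, (fun x => x == 'R') x = true := ⟨'R', hmem, by simp⟩
    have hlt := removeFirst_length_lt _ t hex
    have : (removeFirst (fun x => x == 'R') t ++ [c]).length = (removeFirst (fun x => x == 'R') t).length + 1 := by simp
    simp only [this, List.length_cons]
    omega

def predictPartyVictory_alt (senate : String) : String := loopB senate.toList

-- ===== PRECONDITION & SPEC =====
def Spec_predictPartyVictory (senate : String) (out : String) : Prop := out = predictPartyVictory_alt senate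
instance (senate : String) (out : String) : Decidable (Spec_predictPartyVictory senate out) := by unfold Spec_predictPartyVictory; infer_instance

-- ===== CLAIM (what is proved, stated in full; the proofs are below) =====
def Claim_equal_predictPartyVictory : Prop := ∀ (senate : String), Dom_predictPartyVictory senate → Spec_predictPartyVictory senate (predictPartyVictory senate)

-- ===== LEMMAS AND PROOFS =====

-- abstract state for the invariant: the queue as (index, isRadiant) pairs; labels are
-- strictly increasing and every later label is within +n of every earlier one
def rsOf (l : List (Int × Bool)) : List Int := (l.filter (fun p => p.2)).map (fun p => p.1)
def dsOf (l : List (Int × Bool)) : List Int := (l.filter (fun p => !p.2)).map (fun p => p.1)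
def patOf (q : List Char) : List Bool := q.map (fun c => c == 'R')

inductive Chain (n : Int) : List (Int × Bool) → Prop
  | nil : Chain n []
  | cons {i : Int} {b : Bool} {l : List (Int × Bool)} :
      (∀ p ∈ l, i < p.1 ∧ p.1 < i + n) → Chain n l → Chain n ((i, b) :: l)

-- remove the first pair whose faction flag equals b
def remB (b : Bool) : List (Int × Bool) → List (Int × Bool)
  | [] => []
  | p :: l => if p.2 == b then l else p :: remB b l

-- remove the first boolean satisfying pb
def remBool (pb : Bool → Bool) : List Bool → List Bool
  | [] => []
  | x :: xs => if pb x then xs else x :: remBool pb xs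

theorem rsOf_cons (i : Int) (b : Bool) (l : List (Int × Bool)) :
    rsOf ((i, b) :: l) = if b then i :: rsOf l else rsOf l := by
  cases b <;> simp [rsOf]

theorem dsOf_cons (i : Int) (b : Bool) (l : List (Int × Bool)) :
    dsOf ((i, b) :: l) = if b then dsOf l else i :: dsOf l := by
  cases b <;> simp [dsOf]

theorem rsOf_append (l₁ l₂ : List (Int × Bool)) : rsOf (l₁ ++ l₂) = rsOf l₁ ++ rsOf l₂ := by
  simp [rsOf]

theorem dsOf_append (l₁ l₂ : List (Int × Bool)) : dsOf (l₁ ++ l₂) = dsOf l₁ ++ dsOf l₂ := by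
  simp [dsOf]

theorem rs_ds_length : ∀ l : List (Int × Bool), (rsOf l).length + (dsOf l).length = l.length := by
  intro l
  induction l with
  | nil => simp [rsOf, dsOf]
  | cons p l ih =>
    obtain ⟨i, b⟩ := p
    cases b <;> simp [rsOf_cons, dsOf_cons] <;> omega

theorem count_rs : ∀ (q : List Char) (l : List (Int × Bool)),
    patOf q = l.map (fun p => p.2) → q.count 'R' = (rsOf l).length := by
  intro q
  induction q with
  | nil =>
    intro l h
    have : l = [] := by
      cases l with
      | nil => rfl
      | cons p l => simp [patOf] at h
    simp [this, rsOf]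
  | cons c q ih =>
    intro l h
    cases l with
    | nil => simp [patOf] at h
    | cons p l =>
      obtain ⟨i, b⟩ := p
      simp only [patOf, List.map_cons] at h
      obtain ⟨h1, h2⟩ := List.cons_eq_cons.mp h
      have h2 : patOf q = l.map (fun p => p.2) := h2
      have := ih l h2
      rw [List.count_cons]
      cases b with
      | true =>
        have hc : c = 'R' := by simpa using h1
        simp [rsOf_cons, hc, this]
      | false =>
        have hc : ¬ (c == 'R') = true := by simp [h1]
        have hc' : c ≠ 'R' := by simpa using hc
        simp [rsOf_cons, hc', this]

theorem pat_length : ∀ (q : List Char) (l : List (Int × Bool)),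
    patOf q = l.map (fun p => p.2) → q.length = l.length := by
  intro q l h
  have := congrArg List.length h
  simpa [patOf] using this

theorem mem_remB {p : Int × Bool} {b : Bool} : ∀ {l : List (Int × Bool)}, p ∈ remB b l → p ∈ l := by
  intro l
  induction l with
  | nil => simp [remB]
  | cons x l ih =>
    intro h
    by_cases hx : (x.2 == b) = true
    · simp [remB, hx] at h
      exact List.mem_cons_of_mem _ h
    · simp [remB, hx] at h
      rcases h with h | h
      · simp [h]
      · exact List.mem_cons_of_mem _ (ih h)

theorem rsOf_remB_false : ∀ l : List (Int × Bool), rsOf (remB false l) = rsOf l := by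
  intro l
  induction l with
  | nil => simp [remB]
  | cons p l ih =>
    obtain ⟨i, b⟩ := p
    cases b <;> simp [remB, rsOf_cons, ih]

theorem dsOf_remB_false : ∀ l : List (Int × Bool), dsOf (remB false l) = (dsOf l).tail := by
  intro l
  induction l with
  | nil => simp [remB, dsOf]
  | cons p l ih =>
    obtain ⟨i, b⟩ := p
    cases b <;> simp [remB, dsOf_cons, ih]

theorem dsOf_remB_true : ∀ l : List (Int × Bool), dsOf (remB true l) = dsOf l := by
  intro l
  induction l with
  | nil => simp [remB]
  | cons p l ih =>
    obtain ⟨i, b⟩ := p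
    cases b <;> simp [remB, dsOf_cons, ih]

theorem rsOf_remB_true : ∀ l : List (Int × Bool), rsOf (remB true l) = (rsOf l).tail := by
  intro l
  induction l with
  | nil => simp [remB, rsOf]
  | cons p l ih =>
    obtain ⟨i, b⟩ := p
    cases b <;> simp [remB, rsOf_cons, ih]

theorem chain_remB {n : Int} {b : Bool} : ∀ {l : List (Int × Bool)}, Chain n l → Chain n (remB b l) := by
  intro l h
  induction h with
  | nil => exact Chain.nil
  | @cons i bb l hb hc ih =>
    by_cases hx : (bb == b) = true
    · simpa [remB, hx] using hc
    · have hr : remB b ((i, bb) :: l) = (i, bb) :: remB b l := by simp [remB, hx]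
      rw [hr]
      exact Chain.cons (fun p hp => hb p (mem_remB hp)) ih

theorem chain_append {n j : Int} {b : Bool} : ∀ {l : List (Int × Bool)}, Chain n l →
    (∀ p ∈ l, p.1 < j ∧ j < p.1 + n) → Chain n (l ++ [(j, b)]) := by
  intro l h
  induction h with
  | nil => intro _; exact Chain.cons (by simp) Chain.nil
  | @cons i bb l hb hc ih =>
    intro hj
    have hji := hj (i, bb) (by simp)
    refine Chain.cons ?_ (ih (fun p hp => hj p (List.mem_cons_of_mem _ hp)))
    intro p hp
    rcases List.mem_append.mp hp with hp | hp
    · exact hb p hp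
    · have : p = (j, b) := by simpa using hp
      subst this
      exact ⟨hji.1, hji.2⟩

theorem ds_head : ∀ (l : List (Int × Bool)) (d0 : Int) (rest : List Int),
    dsOf l = d0 :: rest → ∃ p ∈ l, p.1 = d0 ∧ p.2 = false := by
  intro l
  induction l with
  | nil => intro d0 rest h; simp [dsOf] at h
  | cons p l ih =>
    obtain ⟨i, b⟩ := p
    intro d0 rest h
    cases b with
    | true =>
      simp [dsOf_cons] at h
      obtain ⟨p, hp, h1, h2⟩ := ih d0 rest h
      exact ⟨p, List.mem_cons_of_mem _ hp, h1, h2⟩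
    | false =>
      simp [dsOf_cons] at h
      exact ⟨(i, false), by simp, by simp [h.1], rfl⟩

theorem rs_head : ∀ (l : List (Int × Bool)) (r0 : Int) (rest : List Int),
    rsOf l = r0 :: rest → ∃ p ∈ l, p.1 = r0 ∧ p.2 = true := by
  intro l
  induction l with
  | nil => intro r0 rest h; simp [rsOf] at h
  | cons p l ih =>
    obtain ⟨i, b⟩ := p
    intro r0 rest h
    cases b with
    | false =>
      simp [rsOf_cons] at h
      obtain ⟨p, hp, h1, h2⟩ := ih r0 rest h
      exact ⟨p, List.mem_cons_of_mem _ hp, h1, h2⟩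
    | true =>
      simp [rsOf_cons] at h
      exact ⟨(i, true), by simp, by simp [h.1], rfl⟩

theorem pat_removeFirst (p : Char → Bool) (pb : Bool → Bool) (hp : ∀ x, p x = pb (x == 'R')) :
    ∀ q : List Char, patOf (removeFirst p q) = remBool pb (patOf q) := by
  intro q
  induction q with
  | nil => simp [removeFirst, patOf, remBool]
  | cons x q ih =>
    by_cases hx : p x = true
    · have : pb (x == 'R') = true := (hp x) ▸ hx
      simp [removeFirst, hx, patOf, remBool, this]
    · have : ¬ pb (x == 'R') = true := fun h => hx ((hp x).symm ▸ h)
      simp only [removeFirst, patOf, remBool, List.map_cons]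
      rw [if_neg hx, if_neg this]
      simpa [patOf] using congrArg (List.cons (x == 'R')) ih

theorem map_remB (b : Bool) : ∀ l : List (Int × Bool),
    (remB b l).map (fun p => p.2) = remBool (fun y => y == b) (l.map (fun p => p.2)) := by
  intro l
  induction l with
  | nil => simp [remB, remBool]
  | cons p l ih =>
    by_cases hx : (p.2 == b) = true
    · simp [remB, remBool, hx]
    · simp only [remB, remBool, List.map_cons]
      rw [if_neg hx, if_neg hx]
      simpa using congrArg (List.cons p.2) ih

theorem loopA_nil (d : List Int) (n : Int) : loopA [] d n = "Dire" := by
  rw [loopA.eq_def]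

theorem loopA_cons_nil (r0 : Int) (r : List Int) (n : Int) : loopA (r0 :: r) [] n = "Radiant" := by
  rw [loopA.eq_def]

theorem loopA_cons (r0 : Int) (r : List Int) (d0 : Int) (d : List Int) (n : Int) :
    loopA (r0 :: r) (d0 :: d) n =
      if r0 < d0 then loopA (r ++ [r0 + n]) d n else loopA r (d ++ [d0 + n]) n := by
  rw [loopA.eq_def]

theorem loopB_nil : loopB [] = "Dire" := by
  rw [loopB.eq_def]
  simp

theorem loopB_cons (c : Char) (t : List Char) (h0 : ¬ (c :: t).count 'R' = 0)
    (h1 : ¬ (c :: t).count 'R' = (c :: t).length) :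
    loopB (c :: t) = if c = 'R' then loopB (removeFirst (fun x => !(x == 'R')) t ++ [c])
      else loopB (removeFirst (fun x => x == 'R') t ++ [c]) := by
  rw [loopB.eq_def, dif_neg h0, dif_neg h1]
  rfl

theorem main_sim (n : Int) : ∀ (N : Nat) (q : List Char) (l : List (Int × Bool)),
    q.length ≤ N → Chain n l → patOf q = l.map (fun p => p.2) →
    loopA (rsOf l) (dsOf l) n = loopB q := by
  intro N
  induction N with
  | zero =>
    intro q l hlen hch hpat
    have hq : q = [] := List.length_eq_zero_iff.mp (Nat.le_zero.mp hlen)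
    subst hq
    have hl : l = [] := by
      cases l with
      | nil => rfl
      | cons p l => simp [patOf] at hpat
    subst hl
    rw [loopB_nil]
    exact loopA_nil _ _
  | succ N ih =>
    intro q l hlen hch hpat
    have hcount : q.count 'R' = (rsOf l).length := count_rs q l hpat
    have hlq : q.length = l.length := pat_length q l hpat
    have hsplit : (rsOf l).length + (dsOf l).length = l.length := rs_ds_length l
    by_cases h0 : q.count 'R' = 0
    · -- no Radiant senators left
      have hrs : rsOf l = [] := List.length_eq_zero_iff.mp (by omega)
      rw [loopB.eq_def, dif_pos h0, hrs]
      exact loopA_nil _ _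
    · by_cases h1 : q.count 'R' = q.length
      · -- no Dire senators left
        have hds : dsOf l = [] := List.length_eq_zero_iff.mp (by omega)
        rw [loopB.eq_def, dif_neg h0, dif_pos h1, hds]
        cases hr : rsOf l with
        | nil => rw [hr] at hcount; simp at hcount; omega
        | cons r0 r' => exact loopA_cons_nil _ _ _
      · -- both factions present
        cases q with
        | nil => exact absurd (by simp) h0
        | cons c t =>
          cases l with
          | nil => simp [patOf] at hpat
          | cons p l' =>
            obtain ⟨i, b⟩ := p
            simp only [patOf, List.map_cons] at hpat
            obtain ⟨hpb, hpt'⟩ := List.cons_eq_cons.mp hpat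
            have hpt : patOf t = l'.map (fun p => p.2) := hpt'
            have hch' : Chain n l' := by cases hch; assumption
            have hbound : ∀ p ∈ l', i < p.1 ∧ p.1 < i + n := by cases hch; assumption
            have htlen : t.length ≤ N := by simp at hlen; omega
            rw [loopB_cons c t h0 h1]
            cases b with
            | true =>
              have hc : c = 'R' := by simpa using hpb
              rw [if_pos hc]
              have hrsl : rsOf ((i, true) :: l') = i :: rsOf l' := by simp [rsOf_cons]
              have hdsl : dsOf ((i, true) :: l') = dsOf l' := by simp [dsOf_cons]
              rw [hrsl, hdsl]
              have hc1 : (c :: t).count 'R' = (rsOf l').length + 1 := by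
                rw [hrsl] at hcount; simpa using hcount
              have hc2 : ((rsOf l').length + 1) + (dsOf l').length = l'.length + 1 := by
                rw [hrsl, hdsl] at hsplit; simpa using hsplit
              have hc3 : t.length = l'.length := by simpa using hlq
              have hlen0 : (c :: t).length = t.length + 1 := by simp
              have hdsne : dsOf l' ≠ [] := by
                intro h
                rw [h] at hc2
                simp at hc2
                exact h1 (by omega)
              cases hds : dsOf l' with
              | nil => exact absurd hds hdsne
              | cons d0 d'' =>
                obtain ⟨pd, hpdmem, hpd1, hpd2⟩ := ds_head l' d0 d'' hds
                have hid : i < d0 := by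
                  have := (hbound pd hpdmem).1
                  omega
                rw [loopA_cons, if_pos hid]
                -- the new abstract state
                have hrs2 : rsOf (remB false l' ++ [(i + n, true)]) = rsOf l' ++ [i + n] := by
                  rw [rsOf_append, rsOf_remB_false]
                  simp [rsOf_cons, rsOf]
                have hds2 : dsOf (remB false l' ++ [(i + n, true)]) = d'' := by
                  rw [dsOf_append, dsOf_remB_false, hds]
                  simp [dsOf_cons, dsOf]
                have hch2 : Chain n (remB false l' ++ [(i + n, true)]) := by
                  refine chain_append (chain_remB hch') ?_
                  intro p hp
                  have := hbound p (mem_remB hp)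
                  exact ⟨this.2, by omega⟩
                have hpat2 : patOf (removeFirst (fun x => !(x == 'R')) t ++ [c]) =
                    (remB false l' ++ [(i + n, true)]).map (fun p => p.2) := by
                  have hrf := pat_removeFirst (fun x => !(x == 'R')) (fun y => y == false)
                    (by intro x; cases hx : x == 'R' <;> simp [hx]) t
                  have hmb := map_remB false l'
                  calc patOf (removeFirst (fun x => !(x == 'R')) t ++ [c])
                      = patOf (removeFirst (fun x => !(x == 'R')) t) ++ [c == 'R'] := by
                        simp [patOf]
                    _ = remBool (fun y => y == false) (patOf t) ++ [true] := by
                        rw [hrf, hc]; simp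
                    _ = remBool (fun y => y == false) (l'.map (fun p => p.2)) ++ [true] := by
                        rw [hpt]
                    _ = (remB false l').map (fun p => p.2) ++ [true] := by rw [hmb]
                    _ = (remB false l' ++ [(i + n, true)]).map (fun p => p.2) := by simp
                have hlen2 : (removeFirst (fun x => !(x == 'R')) t ++ [c]).length ≤ N := by
                  have hex : ∃ x ∈ t, (fun x => !(x == 'R')) x = true := by
                    have hmem : false ∈ l'.map (fun p => p.2) :=
                      List.mem_map.mpr ⟨pd, hpdmem, hpd2⟩
                    rw [← hpt] at hmem
                    obtain ⟨x, hx, hx2⟩ := List.mem_map.mp hmem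
                    exact ⟨x, hx, by simp [hx2]⟩
                  have := removeFirst_length_lt _ t hex
                  simp only [List.length_append, List.length_cons, List.length_nil]
                  omega
                have := ih _ _ hlen2 hch2 hpat2
                rw [hrs2, hds2] at this
                exact this
            | false =>
              have hc : ¬ c = 'R' := by
                intro h
                rw [h] at hpb
                simp at hpb
              rw [if_neg hc]
              have hrsl : rsOf ((i, false) :: l') = rsOf l' := by simp [rsOf_cons]
              have hdsl : dsOf ((i, false) :: l') = i :: dsOf l' := by simp [dsOf_cons]
              rw [hrsl, hdsl]
              have hrsne : rsOf l' ≠ [] := by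
                intro h
                rw [hrsl, h] at hcount
                simp at hcount
                exact h0 hcount
              cases hr : rsOf l' with
              | nil => exact absurd hr hrsne
              | cons r0 r'' =>
                obtain ⟨pr, hprmem, hpr1, hpr2⟩ := rs_head l' r0 r'' hr
                have hir : i < r0 := by
                  have := (hbound pr hprmem).1
                  omega
                rw [loopA_cons, if_neg (by omega : ¬ r0 < i)]
                have hrs2 : rsOf (remB true l' ++ [(i + n, false)]) = r'' := by
                  rw [rsOf_append, rsOf_remB_true, hr]
                  simp [rsOf_cons, rsOf]
                have hds2 : dsOf (remB true l' ++ [(i + n, false)]) = dsOf l' ++ [i + n] := by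
                  rw [dsOf_append, dsOf_remB_true]
                  simp [dsOf_cons, dsOf]
                have hch2 : Chain n (remB true l' ++ [(i + n, false)]) := by
                  refine chain_append (chain_remB hch') ?_
                  intro p hp
                  have := hbound p (mem_remB hp)
                  exact ⟨this.2, by omega⟩
                have hpat2 : patOf (removeFirst (fun x => x == 'R') t ++ [c]) =
                    (remB true l' ++ [(i + n, false)]).map (fun p => p.2) := by
                  have hrf := pat_removeFirst (fun x => x == 'R') (fun y => y == true)
                    (by intro x; cases hx : x == 'R' <;> simp [hx]) t
                  have hmb := map_remB true l'
                  calc patOf (removeFirst (fun x => x == 'R') t ++ [c])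
                      = patOf (removeFirst (fun x => x == 'R') t) ++ [c == 'R'] := by
                        simp [patOf]
                    _ = remBool (fun y => y == true) (patOf t) ++ [false] := by
                        rw [hrf, hpb]
                    _ = remBool (fun y => y == true) (l'.map (fun p => p.2)) ++ [false] := by
                        rw [hpt]
                    _ = (remB true l').map (fun p => p.2) ++ [false] := by rw [hmb]
                    _ = (remB true l' ++ [(i + n, false)]).map (fun p => p.2) := by simp
                have hlen2 : (removeFirst (fun x => x == 'R') t ++ [c]).length ≤ N := by
                  have hex : ∃ x ∈ t, (fun x => x == 'R') x = true := by
                    have hmem : true ∈ l'.map (fun p => p.2) :=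
                      List.mem_map.mpr ⟨pr, hprmem, hpr2⟩
                    rw [← hpt] at hmem
                    obtain ⟨x, hx, hx2⟩ := List.mem_map.mp hmem
                    exact ⟨x, hx, hx2⟩
                  have := removeFirst_length_lt _ t hex
                  simp only [List.length_append, List.length_cons, List.length_nil]
                  omega
                have := ih _ _ hlen2 hch2 hpat2
                rw [hrs2, hds2] at this
                exact this

theorem build_eq : ∀ (e : List (Int × Char)) (r d : List Int),
    e.foldl (fun rd p => if p.2 == 'R' then (rd.1 ++ [p.1], rd.2) else (rd.1, rd.2 ++ [p.1])) (r, d)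
      = (r ++ rsOf (e.map (fun p => (p.1, p.2 == 'R'))),
         d ++ dsOf (e.map (fun p => (p.1, p.2 == 'R')))) := by
  intro e
  induction e with
  | nil => intro r d; simp [rsOf, dsOf]
  | cons p e ih =>
    intro r d
    by_cases hp : (p.2 == 'R') = true
    · simp only [List.foldl_cons, List.map_cons]
      rw [if_pos hp, ih]
      simp [rsOf_cons, dsOf_cons, hp]
    · simp only [List.foldl_cons, List.map_cons]
      rw [if_neg hp, ih]
      simp only [Bool.not_eq_true] at hp
      simp [rsOf_cons, dsOf_cons, hp]

theorem chain_enum : ∀ (s : List Char) (k n : Int), (s.length : Int) ≤ n →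
    Chain n ((PySem.List.enumerate s k).map (fun p => (p.1, p.2 == 'R'))) := by
  intro s
  induction s with
  | nil =>
    intro k n h
    simp [PySem.List.enumerate_nil]
    exact Chain.nil
  | cons x s ih =>
    intro k n h
    simp only [List.length_cons] at h
    rw [PySem.List.enumerate_cons]
    simp only [List.map_cons]
    refine Chain.cons ?_ (ih (k + 1) n (by push_cast at h ⊢; omega))
    intro p hp
    obtain ⟨q, hq, hqe⟩ := List.mem_map.mp hp
    obtain ⟨j, hj, hje⟩ := (PySem.List.mem_enumerate_iff _ _ _).mp hq
    subst hje
    subst hqe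
    constructor
    · push_cast at h ⊢
      omega
    · have hjlt : (j : Int) < (s.length : Int) := by exact_mod_cast hj
      push_cast at h ⊢
      omega

theorem pat_init (s : List Char) :
    patOf s = ((PySem.List.enumerate s 0).map (fun p => (p.1, p.2 == 'R'))).map (fun p => p.2) := by
  rw [List.map_map]
  have : ((fun p => p.2) ∘ (fun p : Int × Char => (p.1, p.2 == 'R'))) =
      ((fun c : Char => c == 'R') ∘ (fun p : Int × Char => p.2)) := rfl
  rw [this, ← List.map_map, PySem.List.map_snd_enumerate]
  rfl

theorem predictPartyVictory_spec_aux (senate : String) :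
    predictPartyVictory senate = predictPartyVictory_alt senate := by
  unfold predictPartyVictory predictPartyVictory_alt
  rw [build_eq]
  simp only [List.nil_append]
  exact main_sim (senate.toList.length : Int) senate.toList.length senate.toList
    ((PySem.List.enumerate senate.toList 0).map (fun p => (p.1, p.2 == 'R')))
    (le_refl _)
    (chain_enum senate.toList 0 (senate.toList.length : Int) (le_refl _))
    (pat_init senate.toList)

-- ===== VERDICT (by name: the statement is the Claim_ definition above) =====
theorem predictPartyVictory_spec : Claim_equal_predictPartyVictory := by
  intro senate _
  unfold Spec_predictPartyVictory
  exact predictPartyVictory_spec_aux senate
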